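-- pv_equiv track=rewrite | github.com/impproductions/advent-of-code-2025 | day10/solution.py | initial_bounds
-- ===== SOURCE A (Python) =====
-- def initial_bounds(target, options):
--     m = len(options)
--     n = len(target)
--     lb = [0] * m
--     ub = [0] * m
--     for j in range(m):
--         coords = [i for i in range(n) if options[j][i] == 1]
--         if not coords:
--             lb[j] = 0
--             ub[j] = 0
--         else:
--             ub[j] = min(target[i] for i in coords)
--     return lb, ub
-- ===== SOURCE B (Python) =====
-- def initial_bounds(target, options):
--     order = sorted(range(len(target)), key=lambda i: target[i])
--     lb = [0] * len(options)
--     ub = []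
--     for row in options:
--         v = 0
--         for i in order:
--             if row[i] == 1:
--                 v = target[i]
--                 break
--         ub.append(v)
--     return lb, ub
-- ===== Notes on version B (the rewrite author's own statement) =====
-- stated objective: alternative
-- what changed: B pre-sorts the column indices by target value once and then computes each option's upper bound as the target at the FIRST flagged index in that sorted order (early exit), replacing A's per-row coords list and min() reduction.
import Mathlib
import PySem

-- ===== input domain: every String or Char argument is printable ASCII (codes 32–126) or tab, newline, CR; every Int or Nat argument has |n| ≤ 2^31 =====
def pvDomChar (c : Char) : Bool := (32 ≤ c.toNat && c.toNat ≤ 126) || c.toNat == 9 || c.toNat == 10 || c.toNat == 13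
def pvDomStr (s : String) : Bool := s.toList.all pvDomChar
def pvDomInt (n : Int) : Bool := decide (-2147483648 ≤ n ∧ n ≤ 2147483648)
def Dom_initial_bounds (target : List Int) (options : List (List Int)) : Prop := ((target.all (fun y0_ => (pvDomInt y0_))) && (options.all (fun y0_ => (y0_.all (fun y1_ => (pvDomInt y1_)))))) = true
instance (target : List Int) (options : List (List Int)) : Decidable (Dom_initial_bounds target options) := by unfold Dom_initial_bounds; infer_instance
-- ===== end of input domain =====

-- B sorts the column indices by target value once, then each option's upper bound is the target
-- at the FIRST flagged index in that sorted order (0 if none) — first-match after a sort instead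
-- of A's per-row coords list and min() reduction. Objective: alternative; same order of cost.

-- ===== PORT A =====
def initial_bounds (target : List Int) (options : List (List Int)) : List Int × List Int :=
  let m : Int := options.length
  let n : Int := target.length
  let lb : List Int := List.replicate options.length 0
  let ub : List Int := List.replicate options.length 0
  (PySem.List.pyRange 0 m 1).foldl (fun s j =>
    let row := PySem.List.pyGetD options j []
    let coords := (PySem.List.pyRange 0 n 1).filter (fun i => PySem.List.pyGetD row i 0 == 1)
    match coords with
    | [] => (s.1.set j.toNat 0, s.2.set j.toNat 0)
    | c :: cs =>
        (s.1, s.2.set j.toNat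
          (cs.foldl (fun acc i => min acc (PySem.List.pyGetD target i 0))
            (PySem.List.pyGetD target c 0)))) (lb, ub)

-- ===== PORT B =====
-- inner 'for i in order: if row[i] == 1: v = target[i]; break' loop (v starts at 0)
def bFirst (target row : List Int) : List Int → Int
  | [] => 0
  | i :: rest =>
      if PySem.List.pyGetD row i 0 == 1 then PySem.List.pyGetD target i 0
      else bFirst target row rest

def initial_bounds_alt (target : List Int) (options : List (List Int)) : List Int × List Int :=
  let order := PySem.List.sorted (PySem.List.pyRange 0 (target.length : Int) 1)
    (fun i => PySem.List.pyGetD target i 0) false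
  let lb : List Int := List.replicate options.length 0
  let ub : List Int := options.foldl (fun ub row => ub ++ [bFirst target row order]) []
  (lb, ub)

-- ===== PRECONDITION & SPEC =====
-- Pre_ excludes exactly the inputs where Python A raises IndexError: some option row shorter
-- than the target (options[j][i] out of range).
def Pre_initial_bounds (target : List Int) (options : List (List Int)) : Prop :=
  options.all (fun row => decide (target.length ≤ row.length)) = true
instance (target : List Int) (options : List (List Int)) : Decidable (Pre_initial_bounds target options) := by unfold Pre_initial_bounds; infer_instance
def pvWitness_initial_bounds : List Int × List (List Int) := ([1, -2], [[1, 0], [0, 1], [1, 1]])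

def Spec_initial_bounds (target : List Int) (options : List (List Int)) (out : List Int × List Int) : Prop := out = initial_bounds_alt target options
instance (target : List Int) (options : List (List Int)) (out : List Int × List Int) : Decidable (Spec_initial_bounds target options out) := by unfold Spec_initial_bounds; infer_instance

-- ===== CLAIM (what is proved, stated in full; the proofs are below) =====
def Claim_equal_initial_bounds : Prop := ∀ (target : List Int) (options : List (List Int)), Dom_initial_bounds target options → Pre_initial_bounds target options → Spec_initial_bounds target options (initial_bounds target options)

-- ===== LEMMAS AND PROOFS =====

-- proof-side vocabulary
def pvT (target : List Int) (i : Int) : Int := PySem.List.pyGetD target i 0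
def pvCoords (target row : List Int) : List Int :=
  (PySem.List.pyRange 0 (target.length : Int) 1).filter
    (fun i => PySem.List.pyGetD row i 0 == 1)
def pvValA (target row : List Int) : Int :=
  match pvCoords target row with
  | [] => 0
  | c :: cs => cs.foldl (fun acc i => min acc (pvT target i)) (pvT target c)

theorem pv_range_succ (N : Nat) :
    PySem.List.pyRange 0 ((N + 1 : Nat) : Int) 1
      = PySem.List.pyRange 0 (N : Int) 1 ++ [(N : Int)] := by
  have hcast : ((N + 1 : Nat) : Int) = (N : Int) + 1 := by push_cast; ring
  rw [hcast, PySem.List.pyRange_one_succ_right (Int.natCast_nonneg N)]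

theorem pv_range_zero : PySem.List.pyRange 0 ((0 : Nat) : Int) 1 = [] := by
  rw [Nat.cast_zero]
  exact PySem.List.pyRange_one_eq_nil (by norm_num)

-- unconditional indexed-write loop is a mapIdx
theorem pv_setfold_write {α : Type} (v : Int → α) :
    ∀ (M : Nat) (st : List α),
    (PySem.List.pyRange 0 (M : Int) 1).foldl (fun s j => s.set j.toNat (v j)) st
      = st.mapIdx (fun k x => if (k : Int) < (M : Int) then v (k : Int) else x) := by
  intro M
  induction M with
  | zero =>
    intro st
    rw [pv_range_zero]
    apply List.ext_getElem
    · simp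
    · intro k h1 h2
      simp
  | succ M ih =>
    intro st
    rw [pv_range_succ, List.foldl_append, ih st]
    simp only [List.foldl_cons, List.foldl_nil, Int.toNat_natCast]
    apply List.ext_getElem
    · simp
    · intro k h1 h2
      simp only [List.length_set, List.length_mapIdx] at h1
      simp only [List.getElem_set, List.getElem_mapIdx]
      by_cases hk : M = k
      · subst hk
        rw [if_pos rfl, if_pos (by omega)]
      · rw [if_neg hk]
        by_cases hlt : (k : Int) < (M : Int)
        · rw [if_pos hlt, if_pos (by omega)]
        · rw [if_neg hlt, if_neg (by omega)]

-- ===== A side: A's result named =====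
theorem pv_A_eq (target : List Int) (options : List (List Int)) :
    initial_bounds target options =
      (List.replicate options.length 0,
       (List.range options.length).map
         (fun (j : Nat) => pvValA target (PySem.List.pyGetD options (j : Int) []))) := by
  have hstep : (fun (s : List Int × List Int) (j : Int) =>
      match (PySem.List.pyRange 0 (target.length : Int) 1).filter
        (fun i => PySem.List.pyGetD (PySem.List.pyGetD options j []) i 0 == 1) with
      | [] => (s.1.set j.toNat 0, s.2.set j.toNat 0)
      | c :: cs =>
          (s.1, s.2.set j.toNat
            (cs.foldl (fun acc i => min acc (PySem.List.pyGetD target i 0))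
              (PySem.List.pyGetD target c 0))))
      = (fun s j =>
          ((fun (l : List Int) (j : Int) =>
              match pvCoords target (PySem.List.pyGetD options j []) with
              | [] => l.set j.toNat 0
              | _ :: _ => l) s.1 j,
           (fun (l : List Int) (j : Int) =>
              l.set j.toNat (pvValA target (PySem.List.pyGetD options j []))) s.2 j)) := by
    funext s j
    rcases hF : (PySem.List.pyRange 0 (target.length : Int) 1).filter
        (fun i => PySem.List.pyGetD (PySem.List.pyGetD options j []) i 0 == 1) with _ | ⟨c, cs⟩ <;>
      simp only [pvValA, pvCoords, pvT, hF]
  simp only [initial_bounds]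
  rw [hstep, PySem.List.foldl_prod_mk
    (fun (l : List Int) (j : Int) =>
      match pvCoords target (PySem.List.pyGetD options j []) with
      | [] => l.set j.toNat 0
      | _ :: _ => l)
    (fun (l : List Int) (j : Int) =>
      l.set j.toNat (pvValA target (PySem.List.pyGetD options j [])))
    (PySem.List.pyRange 0 (options.length : Int) 1)
    (List.replicate options.length 0) (List.replicate options.length 0)]
  rw [Prod.mk.injEq]
  refine ⟨?_, ?_⟩
  · -- lb component: every write stores the 0 already there
    rw [List.foldl_fixed']
    intro j
    rcases pvCoords target (PySem.List.pyGetD options j []) with _ | ⟨c, cs⟩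
    · exact List.set_replicate_self
    · rfl
  · -- ub component: an unconditional indexed-write loop
    rw [pv_setfold_write (fun j => pvValA target (PySem.List.pyGetD options j []))
      options.length (List.replicate options.length 0)]
    apply List.ext_getElem
    · simp
    · intro k h1 h2
      simp only [List.length_mapIdx, List.length_replicate] at h1
      rw [List.getElem_mapIdx, List.getElem_map, List.getElem_range,
        if_pos (by exact_mod_cast h1)]

-- ===== B side =====
-- the break loop returns the first filtered element's target value (0 if none)
theorem pv_bFirst_eq (target row : List Int) :
    ∀ l : List Int, bFirst target row l
      = (match l.filter (fun i => PySem.List.pyGetD row i 0 == 1) with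
         | [] => 0
         | c :: _ => pvT target c) := by
  intro l
  induction l with
  | nil => rfl
  | cons i rest ih =>
    by_cases h : PySem.List.pyGetD row i 0 == 1 <;>
      simp [bFirst, h, ih, pvT]

-- a running min over a list equals the value of any element that is ≤ every element of a
-- permutation of that list
theorem pv_min_eq (f : Int → Int) (c : Int) (cs : List Int) (h : Int) (hs : List Int)
    (hperm : (h :: hs).Perm (c :: cs))
    (hmin : ∀ y ∈ h :: hs, f h ≤ f y) :
    cs.foldl (fun acc i => min acc (f i)) (f c) = f h := by
  have hfold : cs.foldl (fun acc i => min acc (f i)) (f c)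
      = (cs.map f).foldl min (f c) := by
    rw [List.foldl_map]
  rw [hfold]
  have hle := PySem.List.foldl_min_le (cs.map f) (f c)
  have hmem := PySem.List.foldl_min_mem (cs.map f) (f c)
  apply le_antisymm
  · -- fold ≤ f h since h ∈ c :: cs
    have hh : h ∈ c :: cs := hperm.subset (List.mem_cons_self)
    rcases List.mem_cons.mp hh with rfl | hh
    · exact hle.1
    · exact hle.2 (f h) (List.mem_map_of_mem hh)
  · -- f h ≤ fold since fold = f i for some i ∈ c :: cs ⊆ h :: hs
    rcases hmem with heq | hmem
    · rw [heq]
      exact hmin c (hperm.symm.subset List.mem_cons_self)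
    · rcases List.mem_map.mp hmem with ⟨i, hi, heq⟩
      rw [← heq]
      exact hmin i (hperm.symm.subset (List.mem_cons_of_mem c hi))

-- per-row equivalence: A's min over coords = B's first match in sorted order
theorem pv_row (target row : List Int) :
    pvValA target row
      = bFirst target row
          (PySem.List.sorted (PySem.List.pyRange 0 (target.length : Int) 1)
            (fun i => PySem.List.pyGetD target i 0) false) := by
  set key : Int → Int := fun i => PySem.List.pyGetD target i 0 with hkey
  set S := PySem.List.sorted (PySem.List.pyRange 0 (target.length : Int) 1) key false with hS
  set p : Int → Bool := fun i => PySem.List.pyGetD row i 0 == 1 with hp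
  have hperm : (S.filter p).Perm (pvCoords target row) :=
    (PySem.List.sorted_perm (PySem.List.pyRange 0 (target.length : Int) 1) key false).filter p
  rw [pv_bFirst_eq]
  unfold pvValA
  rcases hF : S.filter p with _ | ⟨h, hs⟩
  · -- no flagged index at all
    have : pvCoords target row = [] := by
      have := hperm
      rw [hF] at this
      exact this.symm.eq_nil
    rw [this]
  · -- first flagged index in sorted order is a minimum
    rw [hF] at hperm
    rcases hC : pvCoords target row with _ | ⟨c, cs⟩
    · rw [hC] at hperm
      exact absurd hperm.eq_nil (by simp)
    · rw [hC] at hperm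
      have hpw : (S.filter p).Pairwise (fun a b => key a ≤ key b) :=
        (PySem.List.sorted_pairwise (PySem.List.pyRange 0 (target.length : Int) 1) key).sublist List.filter_sublist
      rw [hF] at hpw
      have hmin : ∀ y ∈ h :: hs, key h ≤ key y := by
        intro y hy
        rcases List.mem_cons.mp hy with rfl | hy
        · exact le_refl _
        · exact (List.pairwise_cons.mp hpw).1 y hy
      have := pv_min_eq key c cs h hs hperm hmin
      simpa [pvT, hkey] using this

-- B's result named
theorem pv_B_eq (target : List Int) (options : List (List Int)) :
    initial_bounds_alt target options =
      (List.replicate options.length 0,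
       options.map (fun row =>
         bFirst target row
           (PySem.List.sorted (PySem.List.pyRange 0 (target.length : Int) 1)
             (fun i => PySem.List.pyGetD target i 0) false))) := by
  simp only [initial_bounds_alt]
  rw [PySem.List.foldl_append_singleton_eq_map, List.nil_append]

-- ===== VERDICT (by name: the statement is the Claim_ definition above) =====
theorem initial_bounds_spec : Claim_equal_initial_bounds := by
  intro target options _ _
  unfold Spec_initial_bounds
  rw [pv_A_eq, pv_B_eq]
  rw [Prod.mk.injEq]
  refine ⟨rfl, ?_⟩
  apply List.ext_getElem
  · simp
  · intro k h1 h2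
    simp only [List.length_map, List.length_range] at h1
    rw [List.getElem_map, List.getElem_range, List.getElem_map]
    have hg : PySem.List.pyGetD options (k : Int) [] = options[k] := by
      rw [PySem.List.pyGetD_natCast, List.getD_eq_getElem _ _ (by simpa using h1)]
    rw [hg, pv_row]
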